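-- pv_equiv track=rewrite | github.com/miicolas/NSI-BAC-2022-2023 | BAC 2023/Epreuve pratique Correction/Sujet 02/Exercice 1.py | indices_maxi
-- ===== SOURCE A (Python) =====
-- def indices_maxi (tab) :
--     nmax = tab[0]
--     for i in range (1,len(tab)):
--         if tab[i]> nmax :
--             nmax = tab[i]
--     liste_indice = []
--
--     for i in range (len(tab)):
--         if nmax == tab[i]:
--             liste_indice.append(i)
--     return (nmax,liste_indice)
-- ===== SOURCE B (Python) =====
-- def indices_maxi(tab):
--     nmax = tab[0]
--     liste_indice = []
--     for i in range(len(tab)):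
--         if tab[i] > nmax:
--             nmax = tab[i]
--             liste_indice = [i]
--         elif tab[i] == nmax:
--             liste_indice.append(i)
--     return (nmax, liste_indice)
-- ===== Notes on version B (the rewrite author's own statement) =====
-- stated objective: simpler
-- what changed: Fuses A's two passes (first find the max, then rescan for its indices) into a single pass that resets the index list whenever a new maximum appears.
import Mathlib
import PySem

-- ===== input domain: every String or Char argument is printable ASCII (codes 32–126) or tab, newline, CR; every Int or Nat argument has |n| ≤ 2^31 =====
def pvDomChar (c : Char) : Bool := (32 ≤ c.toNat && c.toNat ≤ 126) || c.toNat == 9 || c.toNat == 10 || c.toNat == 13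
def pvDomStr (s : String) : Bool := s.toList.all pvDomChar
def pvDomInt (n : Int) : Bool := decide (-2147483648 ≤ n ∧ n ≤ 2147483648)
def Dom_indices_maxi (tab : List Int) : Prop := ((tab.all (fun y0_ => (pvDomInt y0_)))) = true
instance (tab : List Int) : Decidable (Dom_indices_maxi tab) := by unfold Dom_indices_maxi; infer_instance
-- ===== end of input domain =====

-- B fuses A's two passes into a single pass (reset the index list on a new maximum); return value only, no mutation.

-- ===== PORT A =====
-- indexing is ported as pyGetD with default 0: every access has index in range, where pyGetD is exact;
-- the initial read of the first element raises in Python exactly when tab is empty, which Pre_indices_maxi excludes.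
def indices_maxi (tab : List Int) : Int × List Int :=
  let nmax := (PySem.List.pyRange 1 (tab.length : Int) 1).foldl
      (fun nmax i => if PySem.List.pyGetD tab i 0 > nmax then PySem.List.pyGetD tab i 0 else nmax)
      (PySem.List.pyGetD tab 0 0)
  let liste_indice := (PySem.List.pyRange 0 (tab.length : Int) 1).foldl
      (fun l i => if nmax = PySem.List.pyGetD tab i 0 then l ++ [i] else l) []
  (nmax, liste_indice)

-- ===== PORT B =====
def indices_maxi_alt (tab : List Int) : Int × List Int :=
  (PySem.List.pyRange 0 (tab.length : Int) 1).foldl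
    (fun s i =>
      if PySem.List.pyGetD tab i 0 > s.1 then (PySem.List.pyGetD tab i 0, [i])
      else if PySem.List.pyGetD tab i 0 = s.1 then (s.1, s.2 ++ [i])
      else s)
    (PySem.List.pyGetD tab 0 0, ([] : List Int))

-- ===== PRECONDITION & SPEC =====
-- Pre_ excludes the empty list, on which A raises IndexError reading the first element.
def Pre_indices_maxi (tab : List Int) : Prop := tab ≠ []
instance (tab : List Int) : Decidable (Pre_indices_maxi tab) := by unfold Pre_indices_maxi; infer_instance
def pvWitness_indices_maxi : List Int := [3, 1, 3]

def Spec_indices_maxi (tab : List Int) (out : Int × List Int) : Prop := out = indices_maxi_alt tab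
instance (tab : List Int) (out : Int × List Int) : Decidable (Spec_indices_maxi tab out) := by unfold Spec_indices_maxi; infer_instance

-- ===== CLAIM (what is proved, stated in full; the proofs are below) =====
def Claim_equal_indices_maxi : Prop := ∀ (tab : List Int), Dom_indices_maxi tab → Pre_indices_maxi tab → Spec_indices_maxi tab (indices_maxi tab)

-- ===== LEMMAS AND PROOFS =====

-- running maximum of tab[0..k-1] (seeded with tab[0]), as both programs compute it
def mRec (tab : List Int) : Nat → Int
  | 0 => PySem.List.pyGetD tab 0 0
  | k+1 => if PySem.List.pyGetD tab (k : Int) 0 > mRec tab k then PySem.List.pyGetD tab (k : Int) 0 else mRec tab k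

-- indices i < k with tab[i] = m
def idxTo (tab : List Int) (m : Int) : Nat → List Int
  | 0 => []
  | k+1 => idxTo tab m k ++ (if m = PySem.List.pyGetD tab (k : Int) 0 then [(k : Int)] else [])

theorem foldA_eq_mRec (tab : List Int) (n : Nat) :
    (PySem.List.pyRange 1 (n : Int) 1).foldl
      (fun nmax i => if PySem.List.pyGetD tab i 0 > nmax then PySem.List.pyGetD tab i 0 else nmax)
      (PySem.List.pyGetD tab 0 0) = mRec tab n := by
  induction n with
  | zero => simp [PySem.List.pyRange_one_eq_nil, mRec]
  | succ k ih =>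
    cases k with
    | zero =>
      have h0 : PySem.List.pyRange 1 (1 : Int) 1 = [] := PySem.List.pyRange_one_eq_nil le_rfl
      show (PySem.List.pyRange 1 ((1:Nat) : Int) 1).foldl _ _ = _
      rw [show (((1:Nat)) : Int) = (1 : Int) by norm_num, h0]
      simp only [List.foldl_nil, mRec]
      norm_num
    | succ j =>
      have h : ((j + 1 + 1 : Nat) : Int) = ((j + 1 : Nat) : Int) + 1 := by push_cast; ring
      rw [h, PySem.List.pyRange_one_succ_right (by omega), List.foldl_append, ih]
      simp only [List.foldl_cons, List.foldl_nil, mRec]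

theorem foldListe_eq_idxTo (tab : List Int) (m : Int) (n : Nat) (l : List Int) :
    (PySem.List.pyRange 0 (n : Int) 1).foldl
      (fun l i => if m = PySem.List.pyGetD tab i 0 then l ++ [i] else l) l = l ++ idxTo tab m n := by
  induction n generalizing l with
  | zero => simp [PySem.List.pyRange_one_eq_nil, idxTo]
  | succ k ih =>
    have h : ((k + 1 : Nat) : Int) = ((k : Nat) : Int) + 1 := by push_cast; ring
    rw [h, PySem.List.pyRange_one_succ_right (by omega), List.foldl_append, ih]
    show (if m = PySem.List.pyGetD tab (k : Int) 0 then (l ++ idxTo tab m k) ++ [(k : Int)]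
          else l ++ idxTo tab m k) = _
    rw [idxTo]
    split_ifs <;> simp

theorem mRec_le_succ (tab : List Int) (k : Nat) : mRec tab k ≤ mRec tab (k+1) := by
  simp only [mRec]; split <;> omega

theorem le_mRec (tab : List Int) (k n : Nat) (hk : k < n) :
    PySem.List.pyGetD tab (k : Int) 0 ≤ mRec tab n := by
  induction n with
  | zero => omega
  | succ j ih =>
    rcases Nat.lt_succ_iff_lt_or_eq.mp hk with h | h
    · exact le_trans (ih h) (mRec_le_succ tab j)
    · subst h; simp only [mRec]; split <;> omega

theorem idxTo_nil (tab : List Int) (m : Int) (n : Nat)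
    (h : ∀ k < n, m ≠ PySem.List.pyGetD tab (k : Int) 0) : idxTo tab m n = [] := by
  induction n with
  | zero => rfl
  | succ j ih =>
    rw [idxTo, if_neg (h j (Nat.lt_succ_self j)), ih (fun k hk => h k (Nat.lt_succ_of_lt hk))]
    rfl

theorem foldB_eq (tab : List Int) (n : Nat) :
    (PySem.List.pyRange 0 (n : Int) 1).foldl
      (fun s i =>
        if PySem.List.pyGetD tab i 0 > s.1 then (PySem.List.pyGetD tab i 0, [i])
        else if PySem.List.pyGetD tab i 0 = s.1 then (s.1, s.2 ++ [i])
        else s)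
      (PySem.List.pyGetD tab 0 0, ([] : List Int)) = (mRec tab n, idxTo tab (mRec tab n) n) := by
  induction n with
  | zero => simp [PySem.List.pyRange_one_eq_nil, mRec, idxTo]
  | succ k ih =>
    have h : ((k + 1 : Nat) : Int) = ((k : Nat) : Int) + 1 := by push_cast; ring
    rw [h, PySem.List.pyRange_one_succ_right (by omega), List.foldl_append, ih]
    show (if PySem.List.pyGetD tab (k : Int) 0 > mRec tab k
            then (PySem.List.pyGetD tab (k : Int) 0, [(k : Int)])
          else if PySem.List.pyGetD tab (k : Int) 0 = mRec tab k
            then (mRec tab k, idxTo tab (mRec tab k) k ++ [(k : Int)])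
          else (mRec tab k, idxTo tab (mRec tab k) k)) = _
    by_cases h1 : PySem.List.pyGetD tab (k : Int) 0 > mRec tab k
    · have hm : mRec tab (k+1) = PySem.List.pyGetD tab (k : Int) 0 := by
        simp only [mRec]; rw [if_pos h1]
      have hnil : idxTo tab (PySem.List.pyGetD tab (k : Int) 0) k = [] := by
        apply idxTo_nil
        intro j hj
        have := le_mRec tab j k hj
        omega
      rw [if_pos h1, hm, idxTo, if_pos rfl, hnil]
      rfl
    · have hm : mRec tab (k+1) = mRec tab k := by
        simp only [mRec]; rw [if_neg h1]
      by_cases h2 : PySem.List.pyGetD tab (k : Int) 0 = mRec tab k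
      · rw [if_neg h1, if_pos h2, hm, idxTo, if_pos h2.symm]
      · rw [if_neg h1, if_neg h2, hm, idxTo, if_neg (fun e => h2 e.symm)]
        rw [List.append_nil]

-- ===== VERDICT (by name: the statement is the Claim_ definition above) =====
theorem indices_maxi_spec : Claim_equal_indices_maxi := by
  intro tab _ _
  show indices_maxi tab = indices_maxi_alt tab
  unfold indices_maxi indices_maxi_alt
  dsimp only
  rw [foldA_eq_mRec tab tab.length, foldB_eq tab tab.length,
      foldListe_eq_idxTo tab (mRec tab tab.length) tab.length []]
  rw [List.nil_append]
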